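-- pv_equiv track=rewrite | github.com/franck-nkita/tp_crypto_no2 | algo.py | crypt_nkita
-- ===== SOURCE A (Python) =====
-- def crypt_nkita(texte):
--     crypt_value = 0
--     cle = "NKITA"
--
--     for i, char in enumerate(texte):
--         crypt_value += ord(char)
--         crypt_value += ord(cle[i % len(cle)])
--         crypt_value = (crypt_value * 31) % 1000000
--
--     return crypt_value
-- ===== SOURCE B (Python) =====
-- def crypt_nkita(texte):
--     # closed form: v = (sum of (ord(t[i]) + ord("NKITA"[i%5])) * 31^(n-i) mod M) mod M,
--     # each weight computed independently by modular exponentiation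
--     M = 1000000
--     n = len(texte)
--     return sum((ord(c) + ord("NKITA"[i % 5])) * pow(31, n - i, M)
--                for i, c in enumerate(texte)) % M
-- ===== Notes on version B (the rewrite author's own statement) =====
-- stated objective: alternative
-- what changed: Replaces A's sequential Horner-style loop (accumulator rescaled by 31 and reduced mod 1e6 at each step) by the closed form: a single sum comprehension where each character's contribution is weighted independently by the modular power pow(31, n-i, 1e6), with one final modulus.
import Mathlib
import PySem

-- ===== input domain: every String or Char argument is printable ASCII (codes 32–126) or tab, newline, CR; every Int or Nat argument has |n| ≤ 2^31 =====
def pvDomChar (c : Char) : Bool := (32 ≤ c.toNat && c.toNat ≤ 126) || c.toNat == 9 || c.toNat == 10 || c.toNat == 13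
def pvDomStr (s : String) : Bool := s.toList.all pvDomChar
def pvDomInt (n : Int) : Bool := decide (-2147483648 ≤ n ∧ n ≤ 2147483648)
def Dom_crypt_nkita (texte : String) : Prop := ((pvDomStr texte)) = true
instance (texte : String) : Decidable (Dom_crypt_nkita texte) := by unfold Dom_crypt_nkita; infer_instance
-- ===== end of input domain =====

-- B replaces A's sequential Horner loop (mod at every step) by the closed form: a map/sum
-- where each character gets the independent modular weight 31^(n-i) mod 1e6; alternative
-- decomposition (no sequential accumulator), same task.

-- ===== PORT A =====
-- A's for-loop over enumerate(texte) as structural recursion over the (char, index) pairs;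
-- cle[i % 5] via getD: i % 5 < 5 = len(cle), so the Python indexing never raises.
def cryptA_loop : List (Char × Nat) → Int → Int
  | [], v => v
  | (c, i) :: r, v =>
      cryptA_loop r (((v + (c.toNat : Int) + ((("NKITA".toList.getD (i % 5) ' ').toNat : Int))) * 31) % 1000000)

def crypt_nkita (texte : String) : Int := cryptA_loop texte.toList.zipIdx 0

-- ===== PORT B =====
-- Source B's sum comprehension: map each (i, c) to its term, sum, final modulus.
-- Python's three-argument pow(31, n-i, 1000000) is ported as 31^(n-i) % 1000000 (exact: n-i ≥ 0 here).
def crypt_nkita_alt (texte : String) : Int :=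
  let n := texte.toList.length
  (texte.toList.zipIdx.map (fun x =>
      ((x.1.toNat : Int) + ((("NKITA".toList.getD (x.2 % 5) ' ').toNat : Int)))
        * ((31 : Int) ^ (n - x.2) % 1000000))).sum % 1000000

-- ===== PRECONDITION & SPEC =====
def Spec_crypt_nkita (texte : String) (out : Int) : Prop := out = crypt_nkita_alt texte
instance (texte : String) (out : Int) : Decidable (Spec_crypt_nkita texte out) := by unfold Spec_crypt_nkita; infer_instance

-- ===== CLAIM (what is proved, stated in full; the proofs are below) =====
def Claim_equal_crypt_nkita : Prop := ∀ (texte : String), Dom_crypt_nkita texte → Spec_crypt_nkita texte (crypt_nkita texte)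

-- ===== LEMMAS AND PROOFS =====

-- the per-character summand ord(char) + ord(cle[i % 5])
def av (x : Char × Nat) : Int :=
  (x.1.toNat : Int) + ((("NKITA".toList.getD (x.2 % 5) ' ').toNat : Int))

-- Σ av(l[k]) * 31^(|l|-k)  (the exact-arithmetic value both programs reduce mod 1e6)
def Spow : List (Char × Nat) → Int
  | [] => 0
  | x :: r => av x * 31 ^ (r.length + 1) + Spow r

theorem mul_emod_left' (x y : Int) : (x % 1000000 * y) % 1000000 = (x * y) % 1000000 := by
  conv_lhs => rw [Int.mul_emod]
  rw [Int.emod_emod_of_dvd _ dvd_rfl, ← Int.mul_emod]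

theorem cryptA_inv : ∀ (l : List (Char × Nat)) (v : Int),
    cryptA_loop l v % 1000000 = (v * 31 ^ l.length + Spow l) % 1000000 := by
  intro l
  induction l with
  | nil => intro v; simp [cryptA_loop, Spow]
  | cons x r ih =>
      intro v
      obtain ⟨c, i⟩ := x
      have h := ih (((v + (c.toNat : Int) + ((("NKITA".toList.getD (i % 5) ' ').toNat : Int))) * 31) % 1000000)
      rw [cryptA_loop, h, Int.add_emod, mul_emod_left', ← Int.add_emod]
      have : (v + (c.toNat : Int) + ((("NKITA".toList.getD (i % 5) ' ').toNat : Int))) * 31 * 31 ^ r.length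
          = v * 31 ^ (r.length + 1) + av (c, i) * 31 ^ (r.length + 1) := by
        simp [av]; ring
      rw [this, Spow]; congr 1; simp [pow_succ]; ring

theorem cryptA_reduced : ∀ (l : List (Char × Nat)) (v : Int),
    0 ≤ v → v < 1000000 → cryptA_loop l v % 1000000 = cryptA_loop l v := by
  intro l
  induction l with
  | nil => intro v h1 h2; simp [cryptA_loop]; omega
  | cons x r ih =>
      intro v h1 h2
      obtain ⟨c, i⟩ := x
      rw [cryptA_loop]
      exact ih _ (Int.emod_nonneg _ (by norm_num)) (Int.emod_lt_of_pos _ (by norm_num))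

-- B's map/sum, with indices starting at k0 and total length n, matches Spow mod 1e6.
theorem sum_map_eq : ∀ (cs : List Char) (k0 n : Nat), n = k0 + cs.length →
    ((cs.zipIdx k0).map (fun x => av x * ((31 : Int) ^ (n - x.2) % 1000000))).sum % 1000000
      = Spow (cs.zipIdx k0) % 1000000 := by
  intro cs
  induction cs with
  | nil => intro k0 n h; simp [Spow]
  | cons c r ih =>
      intro k0 n h
      rw [List.zipIdx_cons, List.map_cons, List.sum_cons, Spow]
      have hn : n = k0 + (r.length + 1) := by simpa using h
      have hexp : n - k0 = (r.zipIdx (k0 + 1)).length + 1 := by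
        simp [List.length_zipIdx]; omega
      have hr := ih (k0 + 1) n (by simp at h ⊢; omega)
      rw [Int.add_emod, hr, ← Int.add_emod, hexp]
      rw [Int.add_emod, Int.mul_emod, Int.emod_emod_of_dvd _ dvd_rfl, ← Int.mul_emod,
          ← Int.add_emod]

-- ===== VERDICT (by name: the statement is the Claim_ definition above) =====
theorem crypt_nkita_spec : Claim_equal_crypt_nkita := by
  intro texte _
  unfold Spec_crypt_nkita crypt_nkita crypt_nkita_alt
  rw [← cryptA_reduced _ 0 (by norm_num) (by norm_num), cryptA_inv]
  have := sum_map_eq texte.toList 0 texte.toList.length (by simp)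
  simp only [av] at this
  rw [this]
  simp
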